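-- pv_equiv track=rewrite | github.com/minghongxu/More-Machine-Learning-and-Data-Mining | recommendation systems/task2train.py | find_user_profile
-- ===== SOURCE A (Python) =====
-- def find_user_profile(chunk):
--     user_id = chunk[0]
--     word_list = chunk[1]
--     if len(word_list) == 200:
--         return (user_id, word_list)
--     result = {}
--     for word in word_list:
--         if word not in result:
--             result[word] = 1
--         else:
--             result[word] += 1
--     user_profile = sorted(result.items(), key=lambda t: t[1], reverse = True)[:200]
--     return (user_id, list(dict(user_profile)))
-- ===== SOURCE B (Python) =====
-- def find_user_profile(chunk):
--     user_id = chunk[0]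
--     word_list = chunk[1]
--     if len(word_list) == 200:
--         return (user_id, word_list)
--     counts = {}
--     for w in word_list:
--         counts[w] = counts.get(w, 0) + 1
--     buckets = {}
--     for w, c in counts.items():
--         buckets.setdefault(c, []).append(w)
--     maxc = 0
--     for c in counts.values():
--         if c > maxc:
--             maxc = c
--     out = []
--     c = maxc
--     while c > 0:
--         out.extend(buckets.get(c, []))
--         c -= 1
--     return (user_id, out[:200])
-- ===== Notes on version B (the rewrite author's own statement) =====
-- stated objective: alternative
-- what changed: The stable reverse sort of the count dict is replaced by a bucket (counting) sort: words are grouped by frequency into a bucket dict and emitted from the maximal count down to 1, preserving first-appearance order within each bucket, so no comparison sort is performed.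
import Mathlib
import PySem

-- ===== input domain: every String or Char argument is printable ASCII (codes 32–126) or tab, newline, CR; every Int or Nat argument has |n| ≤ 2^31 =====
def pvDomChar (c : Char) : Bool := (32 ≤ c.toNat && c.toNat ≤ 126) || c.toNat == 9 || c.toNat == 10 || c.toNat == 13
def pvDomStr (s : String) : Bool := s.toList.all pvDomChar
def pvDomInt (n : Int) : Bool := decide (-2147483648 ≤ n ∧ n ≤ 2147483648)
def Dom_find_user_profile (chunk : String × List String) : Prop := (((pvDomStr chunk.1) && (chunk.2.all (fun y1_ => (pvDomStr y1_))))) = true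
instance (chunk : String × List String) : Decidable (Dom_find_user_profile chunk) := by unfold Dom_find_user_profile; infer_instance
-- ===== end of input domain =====

-- B replaces the stable reverse sort of the count dict by a bucket (counting) sort:
-- words are grouped by frequency into a dict of buckets and emitted from the
-- maximal count down to 1, preserving first-appearance order inside each bucket
-- (objective: alternative algorithm, comparison sort → distribution sort).

-- ===== PORT A =====
def find_user_profile (chunk : String × List String) : String × List String :=
  let user_id := chunk.1
  let word_list := chunk.2
  if word_list.length == 200 then (user_id, word_list)
  else
    let result : PySem.Dict String Int :=
      word_list.foldl (fun r word =>
        if r.contains word = false then r.insert word 1 else r.modify word 0 (· + 1))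
        PySem.Dict.empty
    let user_profile :=
      PySem.List.slice (PySem.List.sorted result.items (fun t => t.2) true) none (some 200)
    (user_id, (PySem.Dict.ofList user_profile).keys)

-- ===== PORT B =====
-- the `while c > 0:` loop of Source B; the Nat fuel is the current value of c
def findUserProfileWhile (buckets : PySem.Dict Int (List String)) : Nat → List String → List String
  | 0, out => out
  | Nat.succ m, out => findUserProfileWhile buckets m (out ++ buckets.getD ((m + 1 : Nat) : Int) [])

def find_user_profile_alt (chunk : String × List String) : String × List String :=
  let user_id := chunk.1
  let word_list := chunk.2
  if word_list.length == 200 then (user_id, word_list)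
  else
    let counts : PySem.Dict String Int :=
      word_list.foldl (fun d w => d.insert w (d.getD w 0 + 1)) PySem.Dict.empty
    let buckets : PySem.Dict Int (List String) :=
      counts.items.foldl (fun b p => b.modify p.2 [] (· ++ [p.1])) PySem.Dict.empty
    let maxc : Int := counts.values.foldl (fun m c => if c > m then c else m) 0
    let out := findUserProfileWhile buckets maxc.toNat []
    (user_id, PySem.List.slice out none (some 200))

-- ===== PRECONDITION & SPEC =====
def Spec_find_user_profile (chunk : String × List String) (out : String × List String) : Prop := out = find_user_profile_alt chunk
instance (chunk : String × List String) (out : String × List String) : Decidable (Spec_find_user_profile chunk out) := by unfold Spec_find_user_profile; infer_instance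

-- ===== CLAIM (what is proved, stated in full; the proofs are below) =====
def Claim_equal_find_user_profile : Prop := ∀ (chunk : String × List String), Dom_find_user_profile chunk → Spec_find_user_profile chunk (find_user_profile chunk)

-- ===== LEMMAS AND PROOFS =====

def descList : Nat → List Int
  | 0 => []
  | Nat.succ m => ((m + 1 : Nat) : Int) :: descList m

lemma mem_descList (m : Nat) (c : Int) : c ∈ descList m ↔ 1 ≤ c ∧ c ≤ (m : Int) := by
  induction m with
  | zero => simp [descList]; omega
  | succ m ih => simp [descList, ih]; omega

lemma pairwise_descList (m : Nat) : (descList m).Pairwise (fun a b => b < a) := by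
  induction m with
  | zero => simp [descList]
  | succ m ih =>
    refine List.Pairwise.cons (fun b hb => ?_) ih
    have := (mem_descList m b).mp hb
    omega

lemma countsA_eq_counter (ws : List String) :
    ws.foldl (fun r word =>
        if r.contains word = false then r.insert word 1 else r.modify word 0 (· + 1))
      PySem.Dict.empty = PySem.Dict.counter ws := by
  rw [← PySem.Dict.foldl_insert_getD_add_one_eq_counter]
  apply PySem.List.foldl_congr_mem
  intro d w _
  by_cases h : d.contains w
  · simp [h, PySem.Dict.modify]
  · have hg : d.getD w 0 = 0 := PySem.Dict.getD_of_not_contains d 0 (by simpa using h)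
    simp [h, hg]

lemma insertBy_all_before {α : Type} (before : α → α → Bool) (x : α) (l : List α)
    (h : ∀ y ∈ l, before x y = true) : PySem.List.insertBy before x l = x :: l := by
  cases l with
  | nil => rfl
  | cons y ys => simp [PySem.List.insertBy, h y (by simp)]

lemma insertBy_append_not_before {α : Type} (before : α → α → Bool) (x : α) (l1 l2 : List α)
    (h : ∀ y ∈ l1, before x y = false) :
    PySem.List.insertBy before x (l1 ++ l2) = l1 ++ PySem.List.insertBy before x l2 := by
  induction l1 with
  | nil => simp
  | cons y ys ih =>
    simp only [List.cons_append, PySem.List.insertBy, h y (by simp)]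
    simp only [Bool.false_eq_true, if_false]
    rw [ih (fun z hz => h z (by simp [hz]))]

lemma maxc_bound (vs : List Int) (v : Int) (hv : v ∈ vs) :
    v ≤ vs.foldl (fun m c => if c > m then c else m) 0 := by
  have he : vs.foldl (fun m c => if c > m then c else m) 0 = vs.foldl max 0 := by
    apply PySem.List.foldl_congr_mem
    intro m c _; omega
  rw [he]
  exact (PySem.List.le_foldl_max vs 0).2 v hv

lemma maxc_nonneg (vs : List Int) : 0 ≤ vs.foldl (fun m c => if c > m then c else m) 0 := by
  have he : vs.foldl (fun m c => if c > m then c else m) 0 = vs.foldl max 0 := by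
    apply PySem.List.foldl_congr_mem
    intro m c _; omega
  rw [he]
  exact (PySem.List.le_foldl_max vs 0).1

lemma insertBy_flatMap {α : Type} (k : α → Int) (x : α) (cs : List Int)
    (hp : cs.Pairwise (fun a b => b < a)) (hx : k x ∈ cs) (B : Int → List α)
    (hB : ∀ c ∈ cs, ∀ y ∈ B c, k y = c) :
    PySem.List.insertBy (fun a b => decide (k b < k a)) x (cs.flatMap B) =
      cs.flatMap (fun c => B c ++ if k x = c then [x] else []) := by
  induction cs with
  | nil => simp at hx
  | cons c rest ih =>
    rw [List.pairwise_cons] at hp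
    by_cases hxc : k x = c
    · -- x belongs to the head bucket
      have h1 : ∀ y ∈ B c, (fun a b => decide (k b < k a)) x y = false := by
        intro y hy
        have := hB c (by simp) y hy
        simp [this, hxc]
      have h2 : ∀ y ∈ rest.flatMap B, (fun a b => decide (k b < k a)) x y = true := by
        intro y hy
        rw [List.mem_flatMap] at hy
        obtain ⟨c', hc', hy'⟩ := hy
        have hk := hB c' (by simp [hc']) y hy'
        have := hp.1 c' hc'
        simp [hk, hxc]; omega
      have hrest : rest.flatMap (fun c' => B c' ++ if k x = c' then [x] else []) = rest.flatMap B := by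
        apply List.flatMap_congr  -- might not exist; fallback below
        intro c' hc'
        have := hp.1 c' hc'
        have : k x ≠ c' := by omega
        simp [this]
      simp only [List.flatMap_cons]
      rw [insertBy_append_not_before _ _ _ _ h1, insertBy_all_before _ _ _ h2, hrest]
      simp [hxc]
    · have hx' : k x ∈ rest := by simpa [hxc] using hx
      have h1 : ∀ y ∈ B c, (fun a b => decide (k b < k a)) x y = false := by
        intro y hy
        have hk := hB c (by simp) y hy
        have : k x < c := by
          rcases (List.mem_cons.mp hx) with h | h
          · exact absurd h hxc
          · exact hp.1 _ h
        simp [hk]; omega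
      simp only [List.flatMap_cons]
      rw [insertBy_append_not_before _ _ _ _ h1,
        ih hp.2 hx' (fun c' hc' => hB c' (by simp [hc']))]
      simp [hxc]

lemma sorted_rev_eq_flatMap_filter {α : Type} (k : α → Int) (xs : List α) (cs : List Int)
    (hp : cs.Pairwise (fun a b => b < a)) (hmem : ∀ y ∈ xs, k y ∈ cs) :
    PySem.List.sorted xs k true = cs.flatMap (fun c => xs.filter (fun y => k y == c)) := by
  induction xs using List.reverseRecOn with
  | nil =>
    have h2 : cs.flatMap (fun c => ([] : List α).filter (fun y => k y == c)) = [] := by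
      simp [List.flatMap_eq_nil_iff]
    rw [h2]
    rfl
  | append_singleton xs x ih =>
    rw [PySem.List.sorted_rev_eq_foldl_insertBy, List.foldl_append, List.foldl_cons,
      List.foldl_nil, ← PySem.List.sorted_rev_eq_foldl_insertBy,
      ih (fun y hy => hmem y (by simp [hy])),
      insertBy_flatMap k x cs hp (hmem x (by simp)) _
        (fun c hc y hy => by
          have := List.of_mem_filter hy
          simpa using this)]
    apply List.flatMap_congr
    intro c hc
    rw [List.filter_append]
    simp [List.filter_singleton]

lemma while_eq_flatMap (b : PySem.Dict Int (List String)) (m : Nat) (out : List String) :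
    findUserProfileWhile b m out = out ++ (descList m).flatMap (fun c => b.getD c []) := by
  induction m generalizing out with
  | zero => simp [findUserProfileWhile, descList]
  | succ m ih =>
    rw [findUserProfileWhile, ih]
    simp [descList]

lemma buckets_getD (items : List (String × Int)) (c : Int) :
    (items.foldl (fun b p => b.modify p.2 [] (· ++ [p.1])) PySem.Dict.empty).getD c [] =
      (items.filter (fun p => p.2 == c)).map (·.1) := by
  have h1 : items.foldl (fun b p => b.modify p.2 [] (· ++ [p.1])) PySem.Dict.empty
      = (items.map Prod.swap).foldl (fun b q => b.modify q.1 [] (· ++ [q.2])) PySem.Dict.empty := by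
    rw [List.foldl_map]
    apply PySem.List.foldl_congr_mem
    intro b p _
    simp
  rw [h1, PySem.Dict.getD_foldl_modify_append]
  simp [List.filter_map, List.map_map, Function.comp_def, Prod.swap]

lemma keys_ofList_of_nodup (ps : List (String × Int)) (h : (ps.map Prod.fst).Nodup) :
    (PySem.Dict.ofList ps).keys = ps.map Prod.fst := by
  rw [PySem.Dict.ofList, PySem.Dict.update]
  rw [PySem.Dict.keys_foldl_insert_key ps Prod.fst (fun _ p => p.2) PySem.Dict.empty]
  have : (PySem.Dict.empty : PySem.Dict String Int).keys = [] := by rfl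
  rw [this]
  show PySem.Set.ofList (ps.map Prod.fst) = ps.map Prod.fst
  exact PySem.Set.ofList_eq_self_of_nodup _ h


-- ===== VERDICT (by name: the statement is the Claim_ definition above) =====
theorem find_user_profile_spec : Claim_equal_find_user_profile := by
  intro chunk _
  unfold Spec_find_user_profile
  obtain ⟨uid, ws⟩ := chunk
  unfold find_user_profile find_user_profile_alt
  by_cases h200 : ws.length == 200
  · simp only [h200, if_true]
  · simp only [h200, Bool.false_eq_true, if_false]
    rw [countsA_eq_counter, PySem.Dict.foldl_insert_getD_add_one_eq_counter]
    set items := (PySem.Dict.counter ws).items with hitems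
    set maxc := (PySem.Dict.counter ws).values.foldl (fun m c => if c > m then c else m) 0 with hmaxc
    have hmn : (0:Int) ≤ maxc := maxc_nonneg _
    have hcast : ((maxc.toNat : Nat) : Int) = maxc := Int.toNat_of_nonneg hmn
    have hval : ∀ p ∈ items, (1:Int) ≤ p.2 ∧ p.2 ≤ maxc := by
      intro p hp
      constructor
      · rw [hitems, PySem.Dict.items_counter] at hp
        rw [List.mem_map] at hp
        obtain ⟨k, hk, rfl⟩ := hp
        have : k ∈ ws := by rwa [PySem.Set.mem_ofList] at hk
        have := List.count_pos_iff.mpr this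
        simp; omega
      · apply maxc_bound
        simp only [PySem.Dict.values]
        exact List.mem_map.mpr ⟨p, hp, rfl⟩
    have hcs : ∀ p ∈ items, (p.2 : Int) ∈ descList maxc.toNat := by
      intro p hp
      rw [mem_descList, hcast]
      exact hval p hp
    have hsorted : PySem.List.sorted items (fun t => t.2) true
        = (descList maxc.toNat).flatMap (fun c => items.filter (fun p => p.2 == c)) :=
      sorted_rev_eq_flatMap_filter _ items _ (pairwise_descList _) hcs
    -- nodup of the truncated sorted keys
    have hnodA : (((PySem.List.sorted items (fun t => t.2) true).take 200).map Prod.fst).Nodup := by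
      rw [List.map_take]
      apply List.Nodup.sublist (List.take_sublist _ _)
      apply (((PySem.List.sorted_perm items (fun t => t.2) true).map Prod.fst).symm).nodup
      have hk := PySem.Dict.nodup_keys_counter ws
      simpa [PySem.Dict.keys, ← hitems] using hk
    rw [PySem.List.slice_to _ (by norm_num), PySem.List.slice_to _ (by norm_num)]
    rw [keys_ofList_of_nodup _ (by simpa using hnodA)]
    rw [while_eq_flatMap]
    simp only [List.nil_append]
    have hb : ∀ c, (items.foldl (fun b p => b.modify p.2 [] (· ++ [p.1])) PySem.Dict.empty).getD c []
        = (items.filter (fun p => p.2 == c)).map (·.1) := fun c => buckets_getD items c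
    rw [List.flatMap_congr (fun c _ => hb c)]
    rw [← List.map_flatMap, ← hsorted, List.map_take]
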